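-- pv_equiv track=rewrite | github.com/kkb00714/Basic-Coding-Test | 프로그래머스/unrated/181894. 2의 영역/2의 영역.py | solution
-- ===== SOURCE A (Python) =====
-- def solution(arr):
--     answer = []
--     index = None
--     executed = False
--
--     for i in range(len(arr)):
--         if arr[i] == 2:
--             if index is None and arr[i] == 2:
--             # 변수가 아직 설정되지 않았다면 (즉, 처음 2를 발견한 경우) 실행.
--
--                 index = i
--                 # 그런 경우, index에 현재 인덱스 i 값을 저장
--
--                 answer.append(arr[index])
--                 # 그럼 answer에는 arr[i]인 2 값이 들어가게 됨
--                 executed = True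
--
--             else:
--                 answer = arr[index : i + 1]
--
--     if not executed:
--         answer.append(-1)
--
--
--     return answer
-- ===== SOURCE B (Python) =====
-- from itertools import dropwhile
--
-- def solution(arr):
--     if 2 not in arr:
--         return [-1]
--     trimmed = list(dropwhile(lambda x: x != 2, arr))
--     trimmed.reverse()
--     trimmed = list(dropwhile(lambda x: x != 2, trimmed))
--     trimmed.reverse()
--     return trimmed
-- ===== Notes on version B (the rewrite author's own statement) =====
-- stated objective: simpler
-- what changed: A tracks the first-2 index and repeatedly re-slices the array inside an index loop; B guards on 2-membership and then trims the non-2 prefix and suffix with two directional dropwhile passes (front, then on the reversed list), keeping no indices.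
import Mathlib
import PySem

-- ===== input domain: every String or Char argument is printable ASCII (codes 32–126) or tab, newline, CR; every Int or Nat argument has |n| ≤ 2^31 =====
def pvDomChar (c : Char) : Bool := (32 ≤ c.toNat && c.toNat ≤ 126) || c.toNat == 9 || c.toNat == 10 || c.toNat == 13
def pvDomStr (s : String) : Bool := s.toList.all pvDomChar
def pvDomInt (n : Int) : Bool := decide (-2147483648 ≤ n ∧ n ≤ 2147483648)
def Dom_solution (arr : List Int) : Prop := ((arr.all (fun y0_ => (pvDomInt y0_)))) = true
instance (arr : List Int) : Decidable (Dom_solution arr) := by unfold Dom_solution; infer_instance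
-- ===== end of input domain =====

-- B replaces A's index-tracking loop (first-2 index + repeated slicing) by a guard plus two
-- directional dropwhile trims (front, then on the reversed list); objective: simpler.

-- ===== PORT A =====
-- one loop iteration of A (answer, index, executed); arr[index : i+1] is Python slicing
-- (index = None gives arr[:i+1], exactly PySem.List.slice with a `none` start)
def solutionStep (arr : List Int) (st : List Int × Option Int × Bool) (i : Int) :
    List Int × Option Int × Bool :=
  if PySem.List.pyGetD arr i 0 == 2 then
    if st.2.1.isNone && (PySem.List.pyGetD arr i 0 == 2) then
      (st.1 ++ [PySem.List.pyGetD arr i 0], some i, true)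
    else
      (PySem.List.slice arr st.2.1 (some (i + 1)), st.2.1, st.2.2)
  else st

def solution (arr : List Int) : List Int :=
  let s := (PySem.List.pyRange 0 (arr.length : Int) 1).foldl (solutionStep arr)
    ([], none, false)
  if !s.2.2 then s.1 ++ [-1] else s.1

-- ===== PORT B =====
def solution_alt (arr : List Int) : List Int :=
  if !(arr.contains 2) then [-1]
  else
    ((arr.dropWhile (fun x => x != 2)).reverse.dropWhile (fun x => x != 2)).reverse

-- ===== PRECONDITION & SPEC =====
def Spec_solution (arr : List Int) (out : List Int) : Prop := out = solution_alt arr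
instance (arr : List Int) (out : List Int) : Decidable (Spec_solution arr out) := by unfold Spec_solution; infer_instance

-- ===== CLAIM (what is proved, stated in full; the proofs are below) =====
def Claim_equal_solution : Prop := ∀ (arr : List Int), Dom_solution arr → Spec_solution arr (solution arr)

-- ===== LEMMAS AND PROOFS =====

-- B's trimming expression, as a function (used only in the proofs)
def trim2 (xs : List Int) : List Int :=
  ((xs.dropWhile (fun x => x != 2)).reverse.dropWhile (fun x => x != 2)).reverse

lemma solution_alt_eq (arr : List Int) :
    solution_alt arr = if 2 ∈ arr then trim2 arr else [-1] := by
  simp [solution_alt, trim2]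

lemma dropWhile_ne_nil_of_mem (xs : List Int) (h : 2 ∈ xs) :
    ¬ (xs.dropWhile (fun x => x != 2)).isEmpty = true := by
  intro hE
  have := List.dropWhile_eq_nil_iff.mp (List.isEmpty_iff.mp hE) 2 h
  simp at this

-- appending after a list that contains 2 does not change the left trim
lemma dropWhile_append_of_mem (xs ys : List Int) (h : 2 ∈ xs) :
    (xs ++ ys).dropWhile (fun x => x != 2)
      = xs.dropWhile (fun x => x != 2) ++ ys := by
  rw [List.dropWhile_append, if_neg (dropWhile_ne_nil_of_mem xs h)]

lemma takeWhile_append_of_mem (xs ys : List Int) (h : 2 ∈ xs) :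
    (xs ++ ys).takeWhile (fun x => x != 2) = xs.takeWhile (fun x => x != 2) := by
  rw [List.takeWhile_append]
  rw [if_neg]
  intro hlen
  have heq := (List.takeWhile_prefix (l := xs) (fun x => x != 2)).eq_of_length hlen
  have := List.takeWhile_eq_self_iff.mp heq 2 h
  simp at this

lemma dropWhile_eq_drop_length_takeWhile (xs : List Int) :
    xs.dropWhile (fun x => x != 2)
      = xs.drop (xs.takeWhile (fun x => x != 2)).length := by
  induction xs with
  | nil => rfl
  | cons a t ih =>
    by_cases h : (a != 2) = true
    · simp [h, ih]
    · simp [h]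

-- a list ending in 2 needs no right trim
lemma trim2_append_two (xs : List Int) :
    trim2 (xs ++ [2]) = (xs ++ [2]).dropWhile (fun x => x != 2) := by
  have h1 : ∃ w, (xs ++ [2]).dropWhile (fun x => x != 2) = w ++ [2] := by
    rw [List.dropWhile_append]
    split
    · exact ⟨[], by simp⟩
    · exact ⟨xs.dropWhile (fun x => x != 2), rfl⟩
  obtain ⟨w, hw⟩ := h1
  rw [trim2, hw]
  simp [List.reverse_append]

-- appending a non-2 after a list containing 2 keeps the trim
lemma trim2_append_ne (xs : List Int) (a : Int) (hx : 2 ∈ xs) (ha : ¬ a = 2) :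
    trim2 (xs ++ [a]) = trim2 xs := by
  rw [trim2, trim2, dropWhile_append_of_mem xs [a] hx]
  simp [List.reverse_append, ha]

-- F: the number of leading non-2 elements of arr, as takeWhile length
lemma takeWhile_take_of_mem (arr : List Int) (n : Nat) (hm : 2 ∈ arr.take n) :
    (arr.take n).takeWhile (fun x => x != 2)
      = arr.takeWhile (fun x => x != 2) := by
  conv_rhs => rw [← List.take_append_drop n arr]
  rw [takeWhile_append_of_mem _ _ hm]

-- the loop invariant: state after the first n indices
lemma loopA_inv (arr : List Int) (n : Nat) (hn : n ≤ arr.length) :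
    (List.range n).foldl (fun st (k : Nat) => solutionStep arr st (k : Int))
        ([], none, false)
      = if 2 ∈ arr.take n
        then (trim2 (arr.take n),
              some ((arr.takeWhile (fun x => x != 2)).length : Int), true)
        else ([], none, false) := by
  induction n with
  | zero => simp
  | succ n ih =>
    have hn' : n < arr.length := by omega
    have htake : arr.take (n + 1) = arr.take n ++ [arr[n]] := by
      rw [List.take_add_one, List.getElem?_eq_getElem hn']
      rfl
    have hget : PySem.List.pyGetD arr (n : Int) 0 = arr[n] := by
      rw [PySem.List.pyGetD_natCast]
      exact List.getD_eq_getElem arr 0 hn'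
    rw [List.range_succ, List.foldl_append, ih (by omega)]
    by_cases ha : arr[n] = 2
    · by_cases hm : 2 ∈ arr.take n
      · -- subsequent 2: slice branch
        have hm' : 2 ∈ arr.take (n + 1) := by rw [htake]; exact List.mem_append_left _ hm
        have htake2 : arr.take (n + 1) = arr.take n ++ [2] := by rw [htake, ha]
        simp only [List.foldl_cons, List.foldl_nil, if_pos hm, if_pos hm', solutionStep,
          hget, ha]
        have hcast : ((n : Int) + 1) = ((n + 1 : Nat) : Int) := by push_cast; ring
        rw [hcast, PySem.List.slice_natCast]
        have hdrop : List.take (n + 1 - (arr.takeWhile (fun x => x != 2)).length)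
              (List.drop (arr.takeWhile (fun x => x != 2)).length arr)
            = (arr.take (n + 1)).drop (arr.takeWhile (fun x => x != 2)).length := by
          rw [List.drop_take]
        have htw : (arr.take (n + 1)).takeWhile (fun x => x != 2)
            = arr.takeWhile (fun x => x != 2) := takeWhile_take_of_mem arr (n + 1) hm'
        have htrim : trim2 (arr.take (n + 1))
            = (arr.take (n + 1)).drop (arr.takeWhile (fun x => x != 2)).length := by
          rw [htake2, trim2_append_two, ← htake2, dropWhile_eq_drop_length_takeWhile,
            htw]
        simp [hdrop, htrim]
      · -- first 2: append branch
        have hm' : 2 ∈ arr.take (n + 1) := by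
          rw [htake, ha]; exact List.mem_append_right _ (by simp)
        have hall : ∀ x ∈ arr.take n, (x != 2) = true := by
          intro x hx
          simp only [bne_iff_ne, ne_eq]
          intro hx2; exact hm (hx2 ▸ hx)
        simp only [List.foldl_cons, List.foldl_nil, if_neg hm, if_pos hm', solutionStep,
          hget, ha]
        have hF : (arr.takeWhile (fun x => x != 2)).length = n := by
          conv_lhs => rw [← List.take_append_drop n arr]
          rw [List.takeWhile_append, if_pos (by rw [List.takeWhile_eq_self_iff.mpr hall])]
          rw [List.drop_eq_getElem_cons hn', ha, List.takeWhile_cons]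
          simp [List.length_take, Nat.le_of_lt hn']
        have htrim : trim2 (arr.take (n + 1)) = [2] := by
          rw [htake, ha, trim2_append_two, List.dropWhile_append,
            if_pos (by rw [List.isEmpty_iff, List.dropWhile_eq_nil_iff]; exact hall)]
          simp
        simp [hF, htrim]
    · -- a ≠ 2: state unchanged, trim unchanged
      have hmem : (2 ∈ arr.take (n + 1)) ↔ (2 ∈ arr.take n) := by
        rw [htake]
        simp only [List.mem_append, List.mem_singleton]
        constructor
        · intro h
          rcases h with h | h
          · exact h
          · exact absurd h.symm ha
        · exact fun h => Or.inl h
      simp only [List.foldl_cons, List.foldl_nil, solutionStep, hget]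
      have hbeq : (arr[n] == (2 : Int)) = false := by simp [ha]
      rw [hbeq]
      by_cases hm : 2 ∈ arr.take n
      · rw [if_pos hm, if_pos (hmem.mpr hm), htake,
          trim2_append_ne (arr.take n) arr[n] hm ha]
        simp
      · rw [if_neg hm, if_neg (fun h => hm (hmem.mp h))]
        simp

-- ===== VERDICT (by name: the statement is the Claim_ definition above) =====
theorem solution_spec : Claim_equal_solution := by
  intro arr _
  show solution arr = solution_alt arr
  rw [solution_alt_eq]
  unfold solution
  rw [PySem.List.pyRange_zero_natCast, List.foldl_map, loopA_inv arr arr.length le_rfl,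
    List.take_length]
  by_cases h : 2 ∈ arr <;> simp [h, trim2]
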